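-- pv_equiv track=rewrite | github.com/iuschnic/cg-4sem | CG4/CG_4_alg.py | symmetric_eight
-- ===== SOURCE A (Python) =====
-- def symmetric_four(center, point):
--     ans = []
--     cx, cy = center[0], center[1]
--     px, py = point[0], point[1]
--     dx, dy = px - cx, py - cy
--     ans.append([cx + dx, cy + dy])
--     ans.append([cx + dx, cy - dy])
--     ans.append([cx - dx, cy + dy])
--     ans.append([cx - dx, cy - dy])
--     return ans
--
-- def symmetric_eight(center, point):
--     ans = symmetric_four(center, point)
--     cx, cy = center[0], center[1]
--     px, py = point[0], point[1]
--     dx, dy = px - cx, py - cy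
--     # координаты точки в смежной 1/8 части
--     newx = dy + cx
--     newy = dx + cy
--     new = symmetric_four(center, [newx, newy])
--     for elem in new:
--         ans.append(elem)
--     return ans
-- ===== SOURCE B (Python) =====
-- def symmetric_eight(center, point):
--     cx, cy = center[0], center[1]
--     pts = [(point[0] - cx, point[1] - cy)]
--     # grow the orbit of the offset under the three dihedral-group generators,
--     # doubling the list at each stage (slowest-varying generator first)
--     for f in (lambda p: (p[1], p[0]),      # swap axes
--               lambda p: (-p[0], p[1]),     # reflect in y-axis
--               lambda p: (p[0], -p[1])):    # reflect in x-axis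
--         pts = [q for p in pts for q in (p, f(p))]
--     return [[cx + u, cy + v] for u, v in pts]
-- ===== Notes on version B (the rewrite author's own statement) =====
-- stated objective: alternative
-- what changed: Instead of computing the four sign combinations twice via a helper and merging, B starts from the single offset (dx,dy) and grows the dihedral-group orbit by three successive doubling passes (swap, negate-x, negate-y generators), then translates by the center.
-- outside the precondition, e.g. on symmetric_eight([1], [2, 3]): A raises IndexError, B raises IndexError
import Mathlib
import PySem

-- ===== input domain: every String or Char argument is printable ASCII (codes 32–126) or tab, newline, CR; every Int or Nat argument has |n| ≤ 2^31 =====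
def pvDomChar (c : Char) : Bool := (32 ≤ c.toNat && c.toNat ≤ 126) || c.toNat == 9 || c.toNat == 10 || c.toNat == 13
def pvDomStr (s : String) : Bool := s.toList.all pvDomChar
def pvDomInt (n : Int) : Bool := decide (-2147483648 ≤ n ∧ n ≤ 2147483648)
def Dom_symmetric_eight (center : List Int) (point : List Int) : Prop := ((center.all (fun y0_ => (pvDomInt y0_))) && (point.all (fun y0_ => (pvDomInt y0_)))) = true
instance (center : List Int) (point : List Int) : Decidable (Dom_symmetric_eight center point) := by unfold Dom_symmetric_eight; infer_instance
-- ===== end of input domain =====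

-- B builds the eight points as the orbit of the offset under three doubling reflection passes instead of two symmetric_four calls plus a merge loop (alternative decomposition, same cost).
-- ===== PORT A =====
def symmetric_four (center : List Int) (point : List Int) : List (List Int) :=
  let cx := (PySem.List.pyGet? center 0).getD 0
  let cy := (PySem.List.pyGet? center 1).getD 0
  let px := (PySem.List.pyGet? point 0).getD 0
  let py := (PySem.List.pyGet? point 1).getD 0
  let dx := px - cx
  let dy := py - cy
  [[cx + dx, cy + dy], [cx + dx, cy - dy], [cx - dx, cy + dy], [cx - dx, cy - dy]]

def symmetric_eight (center : List Int) (point : List Int) : List (List Int) :=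
  let ans := symmetric_four center point
  let cx := (PySem.List.pyGet? center 0).getD 0
  let cy := (PySem.List.pyGet? center 1).getD 0
  let px := (PySem.List.pyGet? point 0).getD 0
  let py := (PySem.List.pyGet? point 1).getD 0
  let dx := px - cx
  let dy := py - cy
  let newx := dy + cx
  let newy := dx + cy
  let new := symmetric_four center [newx, newy]
  ans ++ new

-- ===== PORT B =====
def symmetric_eight_alt (center : List Int) (point : List Int) : List (List Int) :=
  let cx := (PySem.List.pyGet? center 0).getD 0
  let cy := (PySem.List.pyGet? center 1).getD 0
  let pts0 : List (Int × Int) := [((PySem.List.pyGet? point 0).getD 0 - cx, (PySem.List.pyGet? point 1).getD 0 - cy)]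
  -- orbit doubling under the three generators, slowest-varying first
  let gens : List ((Int × Int) → (Int × Int)) :=
    [fun p => (p.2, p.1), fun p => (-p.1, p.2), fun p => (p.1, -p.2)]
  let pts := gens.foldl (fun acc f => acc.flatMap (fun p => [p, f p])) pts0
  pts.map (fun uv => [cx + uv.1, cy + uv.2])

-- ===== PRECONDITION & SPEC =====
-- Pre_ excludes inputs where Python A raises IndexError (center or point shorter than 2).
def Pre_symmetric_eight (center : List Int) (point : List Int) : Prop := 2 ≤ center.length ∧ 2 ≤ point.length
instance (center : List Int) (point : List Int) : Decidable (Pre_symmetric_eight center point) := by unfold Pre_symmetric_eight; infer_instance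
def pvWitness_symmetric_eight : List Int × List Int := ([0, 0], [1, 2])

def Spec_symmetric_eight (center : List Int) (point : List Int) (out : List (List Int)) : Prop := out = symmetric_eight_alt center point
instance (center : List Int) (point : List Int) (out : List (List Int)) : Decidable (Spec_symmetric_eight center point out) := by unfold Spec_symmetric_eight; infer_instance

-- ===== CLAIM (what is proved, stated in full; the proofs are below) =====
def Claim_equal_symmetric_eight : Prop := ∀ (center : List Int) (point : List Int), Dom_symmetric_eight center point → Pre_symmetric_eight center point → Spec_symmetric_eight center point (symmetric_eight center point)

-- ===== LEMMAS AND PROOFS =====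

-- ===== VERDICT (by name: the statement is the Claim_ definition above) =====
theorem symmetric_eight_spec : Claim_equal_symmetric_eight := by
  intro center point _ hpre
  obtain ⟨hc, hp⟩ := hpre
  match center, point with
  | c0 :: c1 :: _, p0 :: p1 :: _ =>
    unfold Spec_symmetric_eight symmetric_eight symmetric_eight_alt symmetric_four
    simp [PySem.List.pyGet?, PySem.List.pyIdx?, List.foldl, List.flatMap]
    and_intros <;> first | trivial | ring
  | [], _ => simp at hc
  | [_], _ => simp at hc
  | _ :: _ :: _, [] => simp at hp
  | _ :: _ :: _, [_] => simp at hp
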